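-- pv_equiv track=rewrite | github.com/sudeepgud/Project | app/test.py | cluster_sentence
-- ===== SOURCE A (Python) =====
-- from collections import defaultdict
--
-- def cluster_sentence(sentence_labels):
--     # Set the threshold for common labels
--     threshold = 2 # Adjust as needed
--
--     # Create a dictionary to store clusters
--     clusters = defaultdict(list)
--
--     assigned_sentences = set()
--
--     # Iterate through each pair of sentences
--     for sentence1, labels1 in sentence_labels.items():
--         # Skip if the sentence is already assigned to a cluster
--         if sentence1 in assigned_sentences:
--             continue
--
--         # Create a new cluster for the current sentence
--         current_cluster = [sentence1]
--
--         # Mark the current sentence as assigned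
--         assigned_sentences.add(sentence1)
--
--         for sentence2, labels2 in sentence_labels.items():
--             # Skip if the sentence is already assigned to a cluster
--             if sentence2 in assigned_sentences:
--                 continue
--
--             # Count the number of common labels
--             common_labels = len(set(labels1).intersection(labels2))
--
--             # Check if the number of common labels exceeds the threshold
--             if common_labels >= threshold:
--                 # Append sentence to the current cluster
--                 current_cluster.append(sentence2)
--
--                 # Mark the current sentence as assigned
--                 assigned_sentences.add(sentence2)
--
--         # Append the current cluster to the list of clusters
--         clusters[sentence1] = current_cluster
--
--     # Convert the clusters to a list of clusters
--     result_clusters = list(clusters.values())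
--     return result_clusters
-- ===== SOURCE B (Python) =====
-- def cluster_sentence(sentence_labels):
--     threshold = 2
--
--     items = list(sentence_labels.items())
--
--     # Inverted index: label -> sentences carrying that label (distinct labels per sentence).
--     index = {}
--     for sentence, labels in items:
--         for label in dict.fromkeys(labels):
--             index.setdefault(label, []).append(sentence)
--
--     assigned = set()
--     result_clusters = []
--     for sentence1, labels1 in items:
--         if sentence1 in assigned:
--             continue
--         assigned.add(sentence1)
--
--         # Shared-label count for every sentence that shares at least one label.
--         counts = {}
--         for label in dict.fromkeys(labels1):
--             for sentence in index.get(label, []):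
--                 counts[sentence] = counts.get(sentence, 0) + 1
--
--         # Collect matching, still-unassigned sentences in original order.
--         cluster = [sentence1]
--         for sentence2, _labels2 in items:
--             if sentence2 not in assigned and counts.get(sentence2, 0) >= threshold:
--                 cluster.append(sentence2)
--                 assigned.add(sentence2)
--         result_clusters.append(cluster)
--     return result_clusters
-- ===== Notes on version B (the rewrite author's own statement) =====
-- stated objective: faster
-- what changed: Replaces A's O(n^2*L) pairwise set-intersection scans by a one-pass inverted index label->sentences and a per-seed shared-label counter, collecting each cluster's members in original order with a cheap counter lookup instead of recomputing an intersection per pair.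
import Mathlib
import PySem

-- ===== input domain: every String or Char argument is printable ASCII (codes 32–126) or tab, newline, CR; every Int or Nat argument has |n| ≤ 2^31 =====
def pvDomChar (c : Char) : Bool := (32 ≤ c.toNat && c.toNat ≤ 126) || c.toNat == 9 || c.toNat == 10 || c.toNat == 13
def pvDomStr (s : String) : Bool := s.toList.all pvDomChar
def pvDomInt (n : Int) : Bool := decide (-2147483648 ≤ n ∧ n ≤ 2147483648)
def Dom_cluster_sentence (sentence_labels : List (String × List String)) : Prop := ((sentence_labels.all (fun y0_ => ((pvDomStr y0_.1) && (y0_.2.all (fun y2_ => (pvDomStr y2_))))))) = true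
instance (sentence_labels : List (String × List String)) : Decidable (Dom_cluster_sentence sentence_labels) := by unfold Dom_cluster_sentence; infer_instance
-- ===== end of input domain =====

-- B replaces A's quadratic pairwise set-intersections by an inverted index label→sentences
-- plus a shared-label counter per cluster seed (objective: faster, asymptotic).


-- ===== PORT A =====
-- len(set(labels1).intersection(labels2))
def aCommon (labels1 labels2 : List String) : Int :=
  PySem.Set.len (PySem.Set.inter (PySem.Set.ofList labels1) labels2)

-- body of A's inner 'for sentence2, labels2 in sentence_labels.items()' loop;
-- state = (current_cluster, assigned_sentences)
def aInnerStep (labels1 : List String) (st2 : List String × PySem.Set String)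
    (q : String × List String) : List String × PySem.Set String :=
  if PySem.Set.contains st2.2 q.1 then st2
  else if 2 ≤ aCommon labels1 q.2 then (st2.1 ++ [q.1], PySem.Set.add st2.2 q.1)
  else st2

-- body of A's outer loop; state = (assigned_sentences, clusters)
def aOuterStep (items : List (String × List String))
    (st : PySem.Set String × PySem.Dict String (List String))
    (p : String × List String) : PySem.Set String × PySem.Dict String (List String) :=
  if PySem.Set.contains st.1 p.1 then st
  else
    ((items.foldl (aInnerStep p.2) ([p.1], PySem.Set.add st.1 p.1)).2,
     st.2.insert p.1 (items.foldl (aInnerStep p.2) ([p.1], PySem.Set.add st.1 p.1)).1)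

def cluster_sentence (sentence_labels : List (String × List String)) : List (List String) :=
  let items := (PySem.Dict.ofList sentence_labels).items
  (items.foldl (aOuterStep items) (PySem.Set.empty, PySem.Dict.empty)).2.values

-- ===== PORT B =====
-- inverted index: for sentence, labels in items: for label in dict.fromkeys(labels): index[label] += [sentence]
def bIndex (items : List (String × List String)) : PySem.Dict String (List String) :=
  items.foldl
    (fun idx p => (PySem.List.dedup p.2).foldl (fun idx l => idx.modify l [] (· ++ [p.1])) idx)
    PySem.Dict.empty

-- counts[s] = counts.get(s, 0) + 1 over index[label] for label in dict.fromkeys(labels1)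
def bCounts (index : PySem.Dict String (List String)) (labels1 : List String) :
    PySem.Dict String Int :=
  (PySem.List.dedup labels1).foldl
    (fun c l => (index.getD l []).foldl (fun c s => c.insert s (c.getD s 0 + 1)) c)
    PySem.Dict.empty

-- body of B's 'for sentence2, _labels2 in items' collection loop; state = (cluster, assigned)
def bInnerStep (counts : PySem.Dict String Int) (st2 : List String × PySem.Set String)
    (q : String × List String) : List String × PySem.Set String :=
  if !(PySem.Set.contains st2.2 q.1) && decide ((2 : Int) ≤ counts.getD q.1 0) then
    (st2.1 ++ [q.1], PySem.Set.add st2.2 q.1)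
  else st2

-- body of B's main loop; state = (assigned, result_clusters)
def bOuterStep (index : PySem.Dict String (List String)) (items : List (String × List String))
    (st : PySem.Set String × List (List String))
    (p : String × List String) : PySem.Set String × List (List String) :=
  if PySem.Set.contains st.1 p.1 then st
  else
    ((items.foldl (bInnerStep (bCounts index p.2)) ([p.1], PySem.Set.add st.1 p.1)).2,
     st.2 ++ [(items.foldl (bInnerStep (bCounts index p.2)) ([p.1], PySem.Set.add st.1 p.1)).1])

def cluster_sentence_alt (sentence_labels : List (String × List String)) : List (List String) :=
  let items := (PySem.Dict.ofList sentence_labels).items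
  (items.foldl (bOuterStep (bIndex items) items) (PySem.Set.empty, [])).2

-- ===== PRECONDITION & SPEC =====
def Spec_cluster_sentence (sentence_labels : List (String × List String)) (out : List (List String)) : Prop := out = cluster_sentence_alt sentence_labels
instance (sentence_labels : List (String × List String)) (out : List (List String)) : Decidable (Spec_cluster_sentence sentence_labels out) := by unfold Spec_cluster_sentence; infer_instance

-- ===== CLAIM (what is proved, stated in full; the proofs are below) =====
def Claim_equal_cluster_sentence : Prop := ∀ (sentence_labels : List (String × List String)), Dom_cluster_sentence sentence_labels → Spec_cluster_sentence sentence_labels (cluster_sentence sentence_labels)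

-- ===== LEMMAS AND PROOFS =====

-- every (label, sentence) incidence, one per distinct label of each sentence
def incid (items : List (String × List String)) : List (String × String) :=
  items.flatMap (fun p => (PySem.List.dedup p.2).map (fun x => (x, p.1)))

lemma bIndex_getD (items : List (String × List String)) (lb : String) :
    (bIndex items).getD lb []
      = ((incid items).filter (fun pr => pr.1 == lb)).map (·.2) := by
  have h : bIndex items
      = (incid items).foldl (fun d pr => d.modify pr.1 [] (· ++ [pr.2])) PySem.Dict.empty := by
    unfold bIndex incid
    rw [List.foldl_flatMap]
    apply PySem.List.foldl_congr_mem
    intro acc p _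
    rw [List.foldl_map]
  rw [h, PySem.Dict.getD_foldl_modify_append]
  simp

lemma sum_map_eq_single {beta : Type} (l : List beta) (f : beta -> Nat) (q : beta)
    (hl : l.Nodup) (hq : q ∈ l) (h0 : ∀ p ∈ l, p ≠ q -> f p = 0) :
    (l.map f).sum = f q := by
  induction l with
  | nil => cases hq
  | cons a t ih =>
    rcases List.mem_cons.mp hq with rfl | hqt
    · have hz : ∀ x ∈ t.map f, x = 0 := by
        intro x hx
        rcases List.mem_map.mp hx with ⟨p, hp, rfl⟩
        exact h0 p (List.mem_cons_of_mem _ hp)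
          (fun h => (List.nodup_cons.mp hl).1 (by rw [← h]; exact hp))
      simp [List.sum_eq_zero hz]
    · have ha : f a = 0 := h0 a (List.mem_cons_self ..)
        (fun h => (List.nodup_cons.mp hl).1 (by rw [h]; exact hqt))
      simp [ha, ih (List.nodup_cons.mp hl).2 hqt
        (fun p hp hne => h0 p (List.mem_cons_of_mem _ hp) hne)]

lemma count_bIndex (items : List (String × List String))
    (hnd : (items.map Prod.fst).Nodup) (q : String × List String) (hq : q ∈ items)
    (lb : String) :
    ((bIndex items).getD lb []).count q.1 = if lb ∈ q.2 then 1 else 0 := by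
  rw [bIndex_getD]
  rw [List.count_eq_countP, List.countP_map, List.countP_filter]
  unfold incid
  rw [List.countP_flatMap]
  rw [sum_map_eq_single _ _ q hnd.of_map hq ?h0]
  case h0 =>
    intro p hp hne
    apply List.countP_eq_zero.2
    intro x hx
    have hne1 : ¬ (p.1 = q.1) := fun h => hne (List.inj_on_of_nodup_map hnd hp hq h)
    simp only [Function.comp] at hx ⊢
    rcases List.mem_map.mp hx with ⟨a, ha, rfl⟩
    simp [hne1]
  · simp only [Function.comp, List.countP_map]
    trans (List.countP (fun x : String => x == lb) (PySem.List.dedup q.2))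
    · apply List.countP_congr
      intro x _
      simp
    · rw [← List.count_eq_countP, (PySem.List.nodup_dedup (xs := q.2)).count]
      simp

lemma bCounts_getD (index : PySem.Dict String (List String)) (labels1 : List String)
    (v : String) :
    (bCounts index labels1).getD v 0
      = (((PySem.List.dedup labels1).flatMap (fun lb => index.getD lb [])).count v : Int) := by
  unfold bCounts
  rw [← List.foldl_flatMap, PySem.Dict.getD_foldl_insert_add_one]
  simp

lemma bCounts_eq_aCommon (items : List (String × List String))
    (hnd : (items.map Prod.fst).Nodup) (labels1 : List String)
    (q : String × List String) (hq : q ∈ items) :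
    (bCounts (bIndex items) labels1).getD q.1 0 = aCommon labels1 q.2 := by
  rw [bCounts_getD, List.count_flatMap]
  have hmap : (PySem.List.dedup labels1).map (List.count q.1 ∘ fun lb => (bIndex items).getD lb [])
      = (PySem.List.dedup labels1).map (fun lb => if lb ∈ q.2 then 1 else 0) := by
    apply List.map_congr_left
    intro lb _
    simpa using count_bIndex items hnd q hq lb
  rw [hmap]
  have hsum : ∀ (l : List String), (l.map (fun lb => if lb ∈ q.2 then 1 else 0)).sum
      = l.countP (fun lb => decide (lb ∈ q.2)) := by
    intro l
    induction l with
    | nil => simp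
    | cons a t ih => by_cases h : a ∈ q.2 <;> simp [h, ih, Nat.add_comm]
  rw [hsum]
  unfold aCommon
  rw [List.countP_eq_length_filter]
  simp [PySem.Set.inter, PySem.Set.len, PySem.Set.contains]

lemma inner_fold_eq (items : List (String × List String))
    (hnd : (items.map Prod.fst).Nodup) (labels1 : List String)
    (init : List String × PySem.Set String) :
    items.foldl (bInnerStep (bCounts (bIndex items) labels1)) init
      = items.foldl (aInnerStep labels1) init := by
  apply PySem.List.foldl_congr_mem
  intro acc q hq
  unfold bInnerStep aInnerStep
  rw [bCounts_eq_aCommon items hnd labels1 q hq]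
  by_cases hc : q.1 ∈ acc.2
  · simp [hc]
  · by_cases h2 : (2 : Int) ≤ aCommon labels1 q.2 <;> simp [hc, h2]

lemma inner_fold_mono (labels1 : List String) (l : List (String × List String))
    (st2 : List String × PySem.Set String) (x : String) (hx : x ∈ st2.2) :
    x ∈ (l.foldl (aInnerStep labels1) st2).2 := by
  induction l generalizing st2 with
  | nil => simpa using hx
  | cons q t ih =>
    rw [List.foldl_cons]
    apply ih
    unfold aInnerStep
    split_ifs <;> simp [PySem.Set.mem_add, hx]

lemma values_insert_fresh (d : PySem.Dict String (List String)) (k : String)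
    (v : List String) (h : d.contains k = false) :
    (d.insert k v).values = d.values ++ [v] := by
  have h2 := PySem.Dict.items_insert_of_not_contains (d := d) (k := k) (v := v) h
  simp [PySem.Dict.values, h2]

lemma outer_fold_eq (items : List (String × List String))
    (hnd : (items.map Prod.fst).Nodup) :
    ∀ (rest : List (String × List String)) (s : PySem.Set String)
      (d : PySem.Dict String (List String)) (l : List (List String)),
      d.values = l → (∀ k, d.contains k = true → k ∈ s) →
      (rest.foldl (aOuterStep items) (s, d)).2.values
        = (rest.foldl (bOuterStep (bIndex items) items) (s, l)).2 := by
  intro rest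
  induction rest with
  | nil => intro s d l hv _; simpa using hv
  | cons p t ih =>
    intro s d l hv hinv
    rw [List.foldl_cons, List.foldl_cons]
    by_cases hp : p.1 ∈ s
    · rw [show aOuterStep items (s, d) p = (s, d) by unfold aOuterStep; simp [hp],
          show bOuterStep (bIndex items) items (s, l) p = (s, l) by unfold bOuterStep; simp [hp]]
      exact ih s d l hv hinv
    · have hpc : ¬ (PySem.Set.contains s p.1 = true) := by
        simp [hp]
      have hstepA : aOuterStep items (s, d) p
          = ((items.foldl (aInnerStep p.2) ([p.1], PySem.Set.add s p.1)).2,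
             d.insert p.1 (items.foldl (aInnerStep p.2) ([p.1], PySem.Set.add s p.1)).1) := by
        unfold aOuterStep; rw [if_neg hpc]
      have hstepB : bOuterStep (bIndex items) items (s, l) p
          = ((items.foldl (aInnerStep p.2) ([p.1], PySem.Set.add s p.1)).2,
             l ++ [(items.foldl (aInnerStep p.2) ([p.1], PySem.Set.add s p.1)).1]) := by
        unfold bOuterStep
        rw [if_neg hpc, inner_fold_eq items hnd p.2 ([p.1], PySem.Set.add s p.1)]
      rw [hstepA, hstepB]
      have hdc : d.contains p.1 = false := by
        rcases h : d.contains p.1 with _ | _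
        · rfl
        · exact absurd (hinv p.1 h) hp
      have hval : (d.insert p.1 (items.foldl (aInnerStep p.2) ([p.1], PySem.Set.add s p.1)).1).values
          = l ++ [(items.foldl (aInnerStep p.2) ([p.1], PySem.Set.add s p.1)).1] := by
        rw [← hv]
        exact values_insert_fresh d p.1 _ hdc
      have hinv' : ∀ k, (d.insert p.1 (items.foldl (aInnerStep p.2) ([p.1], PySem.Set.add s p.1)).1).contains k = true
          → k ∈ (items.foldl (aInnerStep p.2) ([p.1], PySem.Set.add s p.1)).2 := by
        intro k hk
        rw [PySem.Dict.contains_insert] at hk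
        have hk' : k = p.1 ∨ d.contains k = true := by simpa using hk
        rcases hk' with h1 | h1
        · subst h1
          exact inner_fold_mono p.2 items _ p.1 (by rw [PySem.Set.mem_add]; exact Or.inr rfl)
        · exact inner_fold_mono p.2 items _ k
            (by rw [PySem.Set.mem_add]; exact Or.inl (hinv k h1))
      exact ih _ _ _ hval hinv'

-- ===== VERDICT (by name: the statement is the Claim_ definition above) =====
theorem cluster_sentence_spec : Claim_equal_cluster_sentence := by
  intro xs _
  unfold Spec_cluster_sentence cluster_sentence cluster_sentence_alt
  have hnd : (((PySem.Dict.ofList xs).items).map Prod.fst).Nodup := by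
    have := PySem.Dict.nodup_keys_ofList (ps := xs) (κ := String) (ν := List String)
    simpa [PySem.Dict.keys] using this
  exact outer_fold_eq _ hnd _ PySem.Set.empty PySem.Dict.empty [] rfl
    (by intro k hk; simp [PySem.Dict.contains_empty] at hk)
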